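-- pv_equiv track=rewrite | github.com/Aryudesu/ABC | ABC/400_499/437/C.py | calc
-- ===== SOURCE A (Python) =====
-- def calc(N, WP):
--     allW = 0
--     data = []
--     for w, p in WP:
--         allW += w
--         data.append(p+w)
--     data.sort(reverse=True)
--     count = 0
--     cost = 0
--     for d in data:
--         count += 1
--         cost += d
--         if cost >= allW:
--             return N - count
-- ===== SOURCE B (Python) =====
-- def calc(N, WP):
--     # Selection instead of sorting: repeatedly extract the maximum remaining
--     # p+w value (linear scan + remove) until the accumulated cost reaches the
--     # total weight; no sorted list is ever built.
--     allW = sum(w for w, p in WP)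
--     vals = [p + w for w, p in WP]
--     count = 0
--     cost = 0
--     while vals:
--         d = max(vals)
--         vals.remove(d)
--         count += 1
--         cost += d
--         if cost >= allW:
--             return N - count
-- ===== Notes on version B (the rewrite author's own statement) =====
-- stated objective: alternative
-- what changed: B never sorts: it repeatedly extracts the current maximum p+w by a linear scan (max + remove) from the unsorted list, accumulating until the total weight is reached, i.e. selection-based extraction replaces A's full descending sort followed by a prefix scan.
-- outside the precondition, e.g. on calc(3, []): A returns None, B returns None; on calc(5, [(2, -3)]): A returns None, B returns None
import Mathlib
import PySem

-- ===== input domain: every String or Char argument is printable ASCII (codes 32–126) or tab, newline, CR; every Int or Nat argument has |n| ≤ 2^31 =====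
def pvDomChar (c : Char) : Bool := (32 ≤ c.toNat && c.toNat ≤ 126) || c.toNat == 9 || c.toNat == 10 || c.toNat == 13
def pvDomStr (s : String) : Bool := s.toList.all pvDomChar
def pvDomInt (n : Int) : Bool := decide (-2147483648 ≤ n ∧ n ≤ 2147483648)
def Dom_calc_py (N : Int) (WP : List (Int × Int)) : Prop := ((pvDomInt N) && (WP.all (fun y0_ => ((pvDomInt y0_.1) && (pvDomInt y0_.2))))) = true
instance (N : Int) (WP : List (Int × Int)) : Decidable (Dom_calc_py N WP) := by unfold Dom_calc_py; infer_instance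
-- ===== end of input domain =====

-- B replaces A's full descending sort + prefix scan by selection-based extraction:
-- repeatedly take the maximum remaining p+w (max + remove on the unsorted list) until
-- the accumulated cost reaches the total weight; objective: alternative.
-- Pre_ excludes the inputs on which A falls through its loop and returns None (not an Int);
-- B returns None on exactly the same inputs.


-- ===== PORT A =====
-- second loop of A: count/cost accumulate, early return when cost ≥ allW; none = Python's None fall-through
def calcLoopA (N allW count cost : Int) : List Int → Option Int
  | [] => none
  | d :: ds =>
    if cost + d ≥ allW then some (N - (count + 1)) else calcLoopA N allW (count + 1) (cost + d) ds

def calc_py (N : Int) (WP : List (Int × Int)) : Int :=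
  -- first loop: allW running sum of w, data appends p+w
  let st := WP.foldl (fun (s : Int × List Int) wp => (s.1 + wp.1, s.2 ++ [wp.2 + wp.1])) ((0 : Int), ([] : List Int))
  let data := PySem.List.sorted st.2 (fun x => x) true   -- data.sort(reverse=True)
  (calcLoopA N st.1 0 0 data).getD 0                     -- None fall-through excluded by Pre_

-- ===== PORT B =====
-- B's while loop: d = max(vals); vals.remove(d); stop when cost ≥ allW
-- (the `.getD []` on remove? is only a totality guard: d = max(vals) is always a member)
def calcLoopB (N allW count cost : Int) (vals : List Int) : Option Int :=
  if h : vals = [] then none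
  else
    let d := (PySem.List.max? vals (fun x => x)).getD 0
    let vals' := (PySem.List.remove? vals d).getD []
    if cost + d ≥ allW then some (N - (count + 1))
    else calcLoopB N allW (count + 1) (cost + d) vals'
termination_by vals.length
decreasing_by
  obtain ⟨m, hm⟩ : ∃ m, PySem.List.max? vals (fun x => x) = some m := by
    cases hm : PySem.List.max? vals (fun x => x) with
    | none => exact absurd ((PySem.List.max?_eq_none_iff _ _).mp hm) h
    | some m => exact ⟨m, rfl⟩
  have hd : (PySem.List.max? vals (fun x => x)).getD 0 ∈ vals := by
    rw [hm]; exact PySem.List.max?_mem hm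
  rw [PySem.List.remove?_eq_some_erase vals _ hd]
  simp only [Option.getD_some]
  rw [List.length_erase_of_mem hd]
  exact Nat.sub_lt (List.length_pos_of_mem hd) Nat.one_pos

def calc_py_alt (N : Int) (WP : List (Int × Int)) : Int :=
  let allW := (WP.map (fun wp => wp.1)).sum
  let vals := WP.map (fun wp => wp.2 + wp.1)
  (calcLoopB N allW 0 0 vals).getD 0

-- ===== PRECONDITION & SPEC =====
-- Pre_ excludes exactly the inputs on which A's loop never reaches cost ≥ allW and the
-- Python returns None (no Int); B returns None on the same inputs.
def Pre_calc_py (N : Int) (WP : List (Int × Int)) : Prop :=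
  let vals := WP.map (fun wp => wp.2 + wp.1)
  let desc := PySem.List.sorted vals (fun x => x) true
  ∃ k, k < desc.length ∧ (WP.map (fun wp => wp.1)).sum ≤ ((desc.take (k + 1)).sum)
instance (N : Int) (WP : List (Int × Int)) : Decidable (Pre_calc_py N WP) := by unfold Pre_calc_py; infer_instance

def pvWitness_calc_py : Int × (List (Int × Int)) := (1, [(1, 0)])

def Spec_calc_py (N : Int) (WP : List (Int × Int)) (out : Int) : Prop := out = calc_py_alt N WP
instance (N : Int) (WP : List (Int × Int)) (out : Int) : Decidable (Spec_calc_py N WP out) := by unfold Spec_calc_py; infer_instance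

-- ===== CLAIM (what is proved, stated in full; the proofs are below) =====
def Claim_equal_calc_py : Prop := ∀ (N : Int) (WP : List (Int × Int)), Dom_calc_py N WP → Pre_calc_py N WP → Spec_calc_py N WP (calc_py N WP)

-- ===== LEMMAS AND PROOFS =====

-- A's first loop computes (sum of w's, list of p+w)
lemma calc_fold_char (WP : List (Int × Int)) :
    WP.foldl (fun (s : Int × List Int) wp => (s.1 + wp.1, s.2 ++ [wp.2 + wp.1])) ((0 : Int), ([] : List Int))
      = ((WP.map (fun wp => wp.1)).sum, WP.map (fun wp => wp.2 + wp.1)) := by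
  suffices h : ∀ (s : Int) (acc : List Int),
      WP.foldl (fun (s : Int × List Int) wp => (s.1 + wp.1, s.2 ++ [wp.2 + wp.1])) (s, acc)
        = (s + (WP.map (fun wp => wp.1)).sum, acc ++ WP.map (fun wp => wp.2 + wp.1)) by
    simpa using h 0 []
  induction WP with
  | nil => intro s acc; simp
  | cons hd tl ih =>
    intro s acc
    simp [List.foldl_cons, ih, List.append_assoc]
    ring

-- the descending sort of a nonempty list is its maximum followed by the descending
-- sort of the list with that (first occurrence of the) maximum removed
lemma sorted_rev_cons_max (vals : List Int) (d : Int) (hd : d ∈ vals)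
    (hmax : ∀ y ∈ vals, y ≤ d) :
    PySem.List.sorted vals (fun x => x) true
      = d :: PySem.List.sorted (vals.erase d) (fun x => x) true := by
  have hperm : (d :: PySem.List.sorted (vals.erase d) (fun x => x) true).Perm vals := by
    have h1 : (PySem.List.sorted (vals.erase d) (fun x => x) true).Perm (vals.erase d) :=
      PySem.List.sorted_perm _ _ _
    exact ((h1.cons d).trans (List.perm_cons_erase hd).symm)
  have hpw : (d :: PySem.List.sorted (vals.erase d) (fun x => x) true).Pairwise
      (fun a b => (b : Int) ≤ a) := by
    refine List.pairwise_cons.mpr ⟨?_, ?_⟩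
    · intro y hy
      have : y ∈ vals.erase d := (PySem.List.mem_sorted _ _ _ _).mp hy
      exact hmax y (List.mem_of_mem_erase this)
    · exact PySem.List.sorted_pairwise_rev (xs := vals.erase d) (key := fun x => x)
  -- both (sorted true).reverse and the candidate's reverse are the ascending sort
  have h1 : PySem.List.sorted vals (fun x => x) false
      = (PySem.List.sorted vals (fun x => x) true).reverse :=
    PySem.List.sorted_id_eq_of_perm_of_pairwise _ _
      ((List.reverse_perm _).trans (PySem.List.sorted_perm _ _ _))
      (by rw [List.pairwise_reverse]
          exact PySem.List.sorted_pairwise_rev (xs := vals) (key := fun x => x))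
  have h2 : PySem.List.sorted vals (fun x => x) false
      = (d :: PySem.List.sorted (vals.erase d) (fun x => x) true).reverse :=
    PySem.List.sorted_id_eq_of_perm_of_pairwise _ _
      ((List.reverse_perm _).trans hperm)
      (by rw [List.pairwise_reverse]; exact hpw)
  have := h1.symm.trans h2
  have := congrArg List.reverse this
  simpa using this

-- B's selection loop equals A's scan over the descending sort of the same values
lemma loopB_eq_loopA_sorted : ∀ (n : ℕ) (vals : List Int), vals.length = n →
    ∀ (N allW count cost : Int),
    calcLoopB N allW count cost vals
      = calcLoopA N allW count cost (PySem.List.sorted vals (fun x => x) true) := by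
  intro n
  induction n using Nat.strong_induction_on with
  | _ n ih =>
    intro vals hlen N allW count cost
    by_cases hvals : vals = []
    · subst hvals
      rw [calcLoopB]
      simp [PySem.List.sorted, calcLoopA]
    · obtain ⟨d, hmax⟩ : ∃ d, PySem.List.max? vals (fun x => x) = some d := by
        cases h : PySem.List.max? vals (fun x => x) with
        | none => exact absurd ((PySem.List.max?_eq_none_iff _ _).mp h) hvals
        | some d => exact ⟨d, rfl⟩
      have hd : d ∈ vals := PySem.List.max?_mem hmax
      have hub : ∀ y ∈ vals, y ≤ d := PySem.List.max?_isMax hmax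
      have hrem : PySem.List.remove? vals d = some (vals.erase d) :=
        PySem.List.remove?_eq_some_erase vals d hd
      rw [calcLoopB.eq_def, dif_neg hvals]
      simp only [hmax, hrem, Option.getD_some]
      rw [sorted_rev_cons_max vals d hd hub]
      simp only [calcLoopA]
      by_cases hc : cost + d ≥ allW
      · rw [if_pos hc, if_pos hc]
      · rw [if_neg hc, if_neg hc]
        have hlt : (vals.erase d).length < n := by
          rw [List.length_erase_of_mem hd]
          have := List.length_pos_of_mem hd
          omega
        exact ih _ hlt _ rfl N allW (count + 1) (cost + d)

-- ===== VERDICT (by name: the statement is the Claim_ definition above) =====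
theorem calc_py_spec : Claim_equal_calc_py := by
  intro N WP _ _
  unfold Spec_calc_py calc_py calc_py_alt
  rw [calc_fold_char]
  simp only
  rw [loopB_eq_loopA_sorted (WP.map (fun wp => wp.2 + wp.1)).length _ rfl]
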